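-- pv_equiv track=rewrite | github.com/jessieyz/Python_Tutorial | all_seating_chart.py | build_name_lookup
-- ===== SOURCE A (Python) =====
-- def build_name_lookup(names):
--     lookup = {}
--     duplicates = set()
--
--     for name in names:
--         lower_name = name.lower()
--         if lower_name in lookup:
--             duplicates.add(lower_name)
--         else:
--             lookup[lower_name] = name
--
--         last_name, first_name = [part.strip() for part in name.split(",", 1)]
--         first_last = f"{first_name} {last_name}".strip().lower()
--         if first_last in lookup:
--             duplicates.add(first_last)
--         else:
--             lookup[first_last] = name
--
--     for duplicate in duplicates:
--         lookup.pop(duplicate, None)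
--
--     return lookup, duplicates
-- ===== SOURCE B (Python) =====
-- def build_name_lookup(names):
--     pairs = []
--     for name in names:
--         last_name, first_name = [part.strip() for part in name.split(",", 1)]
--         pairs.append((name.lower(), name))
--         pairs.append((f"{first_name} {last_name}".strip().lower(), name))
--     keys = [k for k, _ in pairs]
--     counts = {}
--     for k in keys:
--         counts[k] = counts.get(k, 0) + 1
--     lookup = {k: name for k, name in pairs if counts[k] == 1}
--     duplicates = {k for i, k in enumerate(keys) if k in keys[:i]}
--     return lookup, duplicates
-- ===== Notes on version B (the rewrite author's own statement) =====
-- stated objective: alternative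
-- what changed: A detects duplicates incrementally inside one stateful loop (dict-membership test per inserted key, then a final pop pass); B first flattens the names into a (key, name) pair list, counts key occurrences with a dict built in one pass, and constructs the lookup by filtering the pairs to count-1 keys and the duplicate set from the repeated occurrences.
import Mathlib
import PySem

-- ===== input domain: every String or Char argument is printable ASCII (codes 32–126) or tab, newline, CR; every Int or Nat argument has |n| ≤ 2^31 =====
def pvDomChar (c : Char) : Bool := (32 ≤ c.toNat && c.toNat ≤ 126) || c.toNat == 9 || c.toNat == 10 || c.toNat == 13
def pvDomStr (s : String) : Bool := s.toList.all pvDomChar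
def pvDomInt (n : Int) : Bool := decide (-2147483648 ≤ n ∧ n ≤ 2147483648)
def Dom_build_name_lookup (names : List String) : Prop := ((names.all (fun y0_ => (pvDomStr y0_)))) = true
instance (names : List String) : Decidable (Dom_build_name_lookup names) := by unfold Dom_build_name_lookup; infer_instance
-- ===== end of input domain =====

-- B replaces A's single stateful loop (incremental dict-membership duplicate detection with a
-- final pop pass) by a count-first, filter-second decomposition over a flat (key, name) pair list.

-- ===== PORT A =====
-- shared helper: both Pythons contain the identical lines
--   last_name, first_name = [part.strip() for part in name.split(",", 1)]
--   f"{first_name} {last_name}".strip().lower()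
-- the `_ => ""` arm is Python's ValueError (no comma in the name): those inputs are excluded by Pre_.
def pvFirstLast (name : String) : String :=
  match ((PySem.Str.splitMax? name "," 1).getD []).map PySem.Str.strip with
  | [last_name, first_name] =>
      PySem.Str.lower (PySem.Str.strip (PySem.Str.join " " [first_name, last_name]))
  | _ => ""

def build_name_lookup (names : List String) : (List (String × String)) × List String :=
  let st := names.foldl
    (fun (st : PySem.Dict String String × PySem.Set String) name =>
      let lower_name := PySem.Str.lower name
      let st1 := if st.1.contains lower_name then (st.1, PySem.Set.add st.2 lower_name)
                 else (st.1.insert lower_name name, st.2)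
      let first_last := pvFirstLast name
      if st1.1.contains first_last then (st1.1, PySem.Set.add st1.2 first_last)
      else (st1.1.insert first_last name, st1.2))
    (PySem.Dict.empty, PySem.Set.empty)
  -- for duplicate in duplicates: lookup.pop(duplicate, None)
  let lookup := st.2.foldl (fun d k => d.erase k) st.1
  (lookup.items, st.2)

-- ===== PORT B =====
def build_name_lookup_alt (names : List String) : (List (String × String)) × List String :=
  let pairs := names.foldl
    (fun acc name => acc ++ [(PySem.Str.lower name, name), (pvFirstLast name, name)]) []
  let keys := pairs.map (fun p => p.1)
  let counts := keys.foldl (fun d k => d.insert k (d.getD k (0 : Int) + 1)) PySem.Dict.empty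
  let lookup := (pairs.filter (fun p => counts.getD p.1 (0 : Int) == 1)).foldl
    (fun d p => d.insert p.1 p.2) PySem.Dict.empty
  let duplicates := ((PySem.List.enumerate keys).filter
      (fun ik => (PySem.List.slice keys none (some ik.1)).contains ik.2)).foldl
    (fun s ik => PySem.Set.add s ik.2) PySem.Set.empty
  (lookup.items, duplicates)

-- ===== PRECONDITION & SPEC =====
-- Pre_ excludes exactly the inputs where Python A raises ValueError: a name without a comma.
def Pre_build_name_lookup (names : List String) : Prop :=
  ∀ name ∈ names, PySem.Str.isIn "," name = true
instance (names : List String) : Decidable (Pre_build_name_lookup names) := by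
  unfold Pre_build_name_lookup; infer_instance
def pvWitness_build_name_lookup : List String := ["Smith, John", "Doe, Jane"]

def Spec_build_name_lookup (names : List String) (out : (List (String × String)) × List String) : Prop := out = build_name_lookup_alt names
instance (names : List String) (out : (List (String × String)) × List String) : Decidable (Spec_build_name_lookup names out) := by unfold Spec_build_name_lookup; infer_instance

-- ===== CLAIM (what is proved, stated in full; the proofs are below) =====
def Claim_equal_build_name_lookup : Prop := ∀ (names : List String), Dom_build_name_lookup names → Pre_build_name_lookup names → Spec_build_name_lookup names (build_name_lookup names)

-- ===== LEMMAS AND PROOFS =====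

-- one insertion step of A's loop, on one (key, name) pair
def pvStep (st : PySem.Dict String String × PySem.Set String) (p : String × String) :
    PySem.Dict String String × PySem.Set String :=
  if st.1.contains p.1 then (st.1, PySem.Set.add st.2 p.1) else (st.1.insert p.1 p.2, st.2)

def pvIns (d : PySem.Dict String String) (p : String × String) : PySem.Dict String String :=
  if d.contains p.1 then d else d.insert p.1 p.2

-- keys repeated w.r.t. the already-seen prefix (emitted at each non-first occurrence, in order)
def pvRep (seen : List String) : List String → List String
  | [] => []
  | k :: t => if seen.contains k then k :: pvRep (seen ++ [k]) t else pvRep (seen ++ [k]) t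

-- first-occurrence pairs w.r.t. the already-seen prefix
def pvDbk (seen : List String) : List (String × String) → List (String × String)
  | [] => []
  | p :: t => if seen.contains p.1 then pvDbk (seen ++ [p.1]) t else p :: pvDbk (seen ++ [p.1]) t

def pvPairOf (name : String) : List (String × String) :=
  [(PySem.Str.lower name, name), (pvFirstLast name, name)]

theorem pvB_pairs (names : List String) :
    names.foldl (fun acc name => acc ++ [(PySem.Str.lower name, name), (pvFirstLast name, name)]) []
    = names.flatMap pvPairOf := by
  simpa using PySem.List.foldl_append_eq_flatMap pvPairOf names []

theorem pvA_flatten (names : List String) (st : PySem.Dict String String × PySem.Set String) :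
    names.foldl
      (fun (st : PySem.Dict String String × PySem.Set String) name =>
        let lower_name := PySem.Str.lower name
        let st1 := if st.1.contains lower_name then (st.1, PySem.Set.add st.2 lower_name)
                   else (st.1.insert lower_name name, st.2)
        let first_last := pvFirstLast name
        if st1.1.contains first_last then (st1.1, PySem.Set.add st1.2 first_last)
        else (st1.1.insert first_last name, st1.2)) st
    = (names.flatMap pvPairOf).foldl pvStep st := by
  induction names generalizing st with
  | nil => rfl
  | cons n t ih =>
      simp only [List.foldl_cons, List.flatMap_cons, List.foldl_append]
      rw [ih]
      rfl

theorem pvMain (ps : List (String × String)) (d : PySem.Dict String String)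
    (seen : List String) (s : PySem.Set String)
    (h : ∀ k, d.contains k = seen.contains k) :
    ps.foldl pvStep (d, s)
    = (ps.foldl pvIns d, (pvRep seen (ps.map (fun p => p.1))).foldl PySem.Set.add s) := by
  induction ps generalizing d seen s with
  | nil => simp [pvRep]
  | cons p t ih =>
      simp only [List.foldl_cons, List.map_cons, pvRep, pvStep, pvIns]
      rw [h p.1]
      by_cases hc : seen.contains p.1 = true
      · simp only [hc, if_pos]
        rw [ih d (seen ++ [p.1]) _ ?_]
        · simp
        · intro k
          rw [h k]
          simp only [List.contains_append, List.contains_cons, List.contains_nil]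
          by_cases hk : (k == p.1) = true
          · have : k = p.1 := by simpa using hk
            subst this
            simpa using hc
          · simp [hk]
      · simp only [Bool.not_eq_true] at hc
        simp only [hc, if_neg, Bool.false_eq_true, not_false_iff]
        rw [ih (d.insert p.1 p.2) (seen ++ [p.1]) s ?_]
        intro k
        rw [PySem.Dict.contains_insert, h k]
        simp only [List.contains_append, List.contains_cons, List.contains_nil]
        cases hs : seen.contains k <;> cases hk : k == p.1 <;> simp

theorem pvItems_foldl_pvIns (ps : List (String × String)) (d : PySem.Dict String String)
    (seen : List String) (h : ∀ k, d.contains k = seen.contains k) :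
    (ps.foldl pvIns d).items = d.items ++ pvDbk seen ps := by
  induction ps generalizing d seen with
  | nil => simp [pvDbk]
  | cons p t ih =>
      simp only [List.foldl_cons, pvDbk, pvIns]
      rw [h p.1]
      by_cases hc : seen.contains p.1 = true
      · simp only [hc, if_pos]
        rw [ih d (seen ++ [p.1]) ?_]
        intro k
        rw [h k]
        simp only [List.contains_append, List.contains_cons, List.contains_nil]
        by_cases hk : (k == p.1) = true
        · have : k = p.1 := by simpa using hk
          subst this; simpa using hc
        · simp [hk]
      · simp only [Bool.not_eq_true] at hc
        simp only [hc, if_neg, Bool.false_eq_true, not_false_iff]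
        rw [ih (d.insert p.1 p.2) (seen ++ [p.1]) ?_]
        · rw [PySem.Dict.items_insert_of_not_contains d p.2 (by rw [h]; exact hc)]
          simp
        · intro k
          rw [PySem.Dict.contains_insert, h k]
          simp only [List.contains_append, List.contains_cons, List.contains_nil]
          cases hs : seen.contains k <;> cases hk : k == p.1 <;> simp

theorem pvErase_fold (S : List String) (d : PySem.Dict String String) :
    (S.foldl (fun d k => d.erase k) d).items
    = d.items.filter (fun p => !(S.contains p.1)) := by
  induction S generalizing d with
  | nil => simp
  | cons k S ih =>
      simp only [List.foldl_cons]
      rw [ih]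
      simp only [PySem.Dict.erase, List.filter_filter]
      apply List.filter_congr
      intro p _
      simp only [List.contains_cons]
      cases hk : p.1 == k <;> simp

theorem pvRep_mem (ks : List String) (seen : List String) (k : String) :
    k ∈ pvRep seen ks ↔ 2 ≤ seen.count k + ks.count k ∧ 1 ≤ ks.count k := by
  induction ks generalizing seen with
  | nil => simp [pvRep]
  | cons a t ih =>
      simp only [pvRep]
      rcases eq_or_ne k a with hk | hk
      · subst hk
        have h1 : (seen ++ [k]).count k = seen.count k + 1 := by simp
        have h2 : (k :: t).count k = t.count k + 1 := by simp
        by_cases hc : seen.contains k = true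
        · have hac : 1 ≤ seen.count k := List.count_pos_iff.mpr (by simpa using hc)
          rw [hc, if_pos rfl, h2]
          simp only [List.mem_cons, true_or, true_iff]
          exact ⟨by omega, by omega⟩
        · simp only [Bool.not_eq_true] at hc
          have hac : seen.count k = 0 :=
            List.count_eq_zero.mpr (by intro hm; simp at hc; exact hc hm)
          rw [hc]
          simp only [Bool.false_eq_true, if_neg, not_false_iff, ih (seen ++ [k]), h1, h2]
          omega
      · have hka : ¬ a = k := fun h => hk h.symm
        have h1 : (seen ++ [a]).count k = seen.count k := by
          simp [List.count_append, hka]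
        have h2 : (a :: t).count k = t.count k := by
          rw [List.count_cons]
          simp [hka]
        rw [h2]
        by_cases hc : seen.contains a = true
        · rw [hc, if_pos rfl]
          simp only [List.mem_cons, hk, false_or, ih (seen ++ [a]), h1]
        · simp only [Bool.not_eq_true] at hc
          rw [hc]
          simp only [Bool.false_eq_true, if_neg, not_false_iff, ih (seen ++ [a]), h1]

theorem pvDbk_sub (ps : List (String × String)) (seen : List String) (p : String × String)
    (h : p ∈ pvDbk seen ps) : p ∈ ps := by
  induction ps generalizing seen with
  | nil => simp [pvDbk] at h
  | cons q t ih =>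
      simp only [pvDbk] at h
      by_cases hc : seen.contains q.1 = true
      · rw [hc, if_pos rfl] at h
        exact List.mem_cons_of_mem _ (ih _ h)
      · simp only [Bool.not_eq_true] at hc
        rw [hc] at h
        simp only [Bool.false_eq_true, if_neg, not_false_iff, List.mem_cons] at h
        rcases h with h | h
        · exact h ▸ List.mem_cons_self
        · exact List.mem_cons_of_mem _ (ih _ h)

theorem pvDbk_filter (keysFull : List String) (ps : List (String × String)) (seen : List String)
    (hinv : ∀ k, (ps.map (fun p => p.1)).count k ≤ keysFull.count k) :
    (pvDbk seen ps).filter (fun p => keysFull.count p.1 == 1)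
    = ps.filter (fun p => keysFull.count p.1 == 1 && !(seen.contains p.1)) := by
  induction ps generalizing seen with
  | nil => simp [pvDbk]
  | cons p t ih =>
      have hinv' : ∀ k, (t.map (fun p => p.1)).count k ≤ keysFull.count k := by
        intro k
        have := hinv k
        simp only [List.map_cons, List.count_cons] at this
        omega
      simp only [pvDbk, List.filter_cons]
      by_cases hc : seen.contains p.1 = true
      · have hmm : p.1 ∈ seen := by simpa using hc
        rw [hc, if_pos rfl]
        rw [ih (seen ++ [p.1]) hinv']
        have : ∀ q ∈ t, (keysFull.count q.1 == 1 && !((seen ++ [p.1]).contains q.1))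
            = (keysFull.count q.1 == 1 && !(seen.contains q.1)) := by
          intro q _
          simp only [List.contains_append, List.contains_cons, List.contains_nil]
          by_cases hq : (q.1 == p.1) = true
          · have hq1 : q.1 = p.1 := by simpa using hq
            rw [hq1]
            simp [hmm]
          · simp only [Bool.not_eq_true] at hq
            rw [hq]
            simp
        rw [List.filter_congr this]
        simp
      · simp only [Bool.not_eq_true] at hc
        rw [hc]
        simp only [Bool.false_eq_true, if_neg, not_false_iff, List.filter_cons]
        by_cases h1 : (keysFull.count p.1 == 1) = true
        · have hcnt1 : keysFull.count p.1 = 1 := by simpa using h1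
          have htc : (t.map (fun p => p.1)).count p.1 = 0 := by
            have := hinv p.1
            simp only [List.map_cons, List.count_cons_self] at this
            omega
          rw [ih (seen ++ [p.1]) hinv']
          have : ∀ q ∈ t, (keysFull.count q.1 == 1 && !((seen ++ [p.1]).contains q.1))
              = (keysFull.count q.1 == 1 && !(seen.contains q.1)) := by
            intro q hq
            simp only [List.contains_append, List.contains_cons, List.contains_nil]
            by_cases hqp : (q.1 == p.1) = true
            · have hqp' : q.1 = p.1 := by simpa using hqp
              exfalso
              have hqm : q.1 ∈ t.map (fun p => p.1) := List.mem_map.mpr ⟨q, hq, rfl⟩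
              rw [hqp'] at hqm
              have := List.count_pos_iff.mpr hqm
              omega
            · simp only [Bool.not_eq_true] at hqp
              rw [hqp]; simp
          rw [List.filter_congr this]
          simp [h1]
        · simp only [Bool.not_eq_true] at h1
          rw [ih (seen ++ [p.1]) hinv']
          have : ∀ q ∈ t, (keysFull.count q.1 == 1 && !((seen ++ [p.1]).contains q.1))
              = (keysFull.count q.1 == 1 && !(seen.contains q.1)) := by
            intro q _
            simp only [List.contains_append, List.contains_cons, List.contains_nil]
            by_cases hqp : (q.1 == p.1) = true
            · have hqp' : q.1 = p.1 := by simpa using hqp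
              rw [hqp', h1]
              simp
            · simp only [Bool.not_eq_true] at hqp
              rw [hqp]; simp
          rw [List.filter_congr this]
          simp [h1]

theorem pvB_dup (ks : List String) (pre : List String) (s0 : PySem.Set String) :
    ((PySem.List.enumerate ks ((pre.length : Nat) : Int)).filter
        (fun ik => (PySem.List.slice (pre ++ ks) none (some ik.1)).contains ik.2)).foldl
      (fun s ik => PySem.Set.add s ik.2) s0
    = (pvRep pre ks).foldl PySem.Set.add s0 := by
  induction ks generalizing pre s0 with
  | nil => simp [PySem.List.enumerate, pvRep]
  | cons k t ih =>
      rw [PySem.List.enumerate_cons]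
      simp only [List.filter_cons]
      have hslice : PySem.List.slice (pre ++ k :: t) none (some ((pre.length : Nat) : Int))
          = pre := by
        rw [PySem.List.slice_to_natCast]
        exact List.take_left
      have hstep : ((pre.length : Nat) : Int) + 1 = (((pre ++ [k]).length : Nat) : Int) := by
        simp
      have happ : pre ++ k :: t = (pre ++ [k]) ++ t := by simp
      simp only [pvRep, hslice]
      by_cases hc : pre.contains k = true
      · rw [hc, if_pos rfl, if_pos rfl]
        simp only [List.foldl_cons]
        rw [hstep]
        rw [happ] at *
        exact ih (pre ++ [k]) (PySem.Set.add s0 k)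
      · simp only [Bool.not_eq_true] at hc
        rw [hc]
        simp only [Bool.false_eq_true, if_neg, not_false_iff]
        rw [hstep, happ]
        exact ih (pre ++ [k]) s0

theorem pvB_dup0 (ks : List String) :
    ((PySem.List.enumerate ks 0).filter
        (fun ik => (PySem.List.slice ks none (some ik.1)).contains ik.2)).foldl
      (fun s ik => PySem.Set.add s ik.2) PySem.Set.empty
    = (pvRep [] ks).foldl PySem.Set.add PySem.Set.empty := by
  simpa using pvB_dup ks [] PySem.Set.empty

theorem pvSet_foldl_contains (l : List String) (a : String) :
    List.contains (l.foldl PySem.Set.add (PySem.Set.empty : PySem.Set String)) a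
    = List.contains l a := by
  have h : l.foldl PySem.Set.add PySem.Set.empty = PySem.Set.ofList l := rfl
  rw [h]
  by_cases hm : a ∈ l
  · have h1 : a ∈ PySem.Set.ofList l := (PySem.Set.mem_ofList l a).mpr hm
    simp [h1, hm]
  · have h1 : a ∉ PySem.Set.ofList l := fun h => hm ((PySem.Set.mem_ofList l a).mp h)
    simp [h1, hm]

theorem pvRep_not_contains (keys : List String) (k : String) (h1 : 1 ≤ keys.count k) :
    (!(List.contains (pvRep [] keys) k)) = (keys.count k == 1) := by
  by_cases hm : k ∈ pvRep [] keys
  · have h2 : 2 ≤ keys.count k := by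
      have := (pvRep_mem keys [] k).mp hm
      simpa using this.1
    have hcontains : List.contains (pvRep [] keys) k = true := by simpa using hm
    rw [hcontains]
    simp only [Bool.not_true]
    have : keys.count k ≠ 1 := by omega
    simp [this]
  · have hcontains : List.contains (pvRep [] keys) k = false := by
      cases h : List.contains (pvRep [] keys) k
      · rfl
      · exact absurd (by simpa using h) hm
    rw [hcontains]
    simp only [Bool.not_false]
    have : keys.count k = 1 := by
      have h2 : ¬ 2 ≤ keys.count k := by
        intro h2
        exact hm ((pvRep_mem keys [] k).mpr ⟨by simpa using h2, h1⟩)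
      omega
    simp [this]

theorem pvCastBeq (c : Nat) : (((c : Nat) : Int) == (1 : Int)) = (c == 1) := by
  cases h : (c == 1)
  · have : c ≠ 1 := by simpa using h
    simp [this]
  · have : c = 1 := by simpa using h
    simp [this]

theorem pvNodup (ps : List (String × String)) :
    ((ps.filter (fun p => ((ps.map (fun p => p.1)).count p.1 == 1))).map (fun p => p.1)).Nodup := by
  rw [List.nodup_iff_count_le_one]
  intro a
  by_cases hm : a ∈ (ps.filter (fun p => ((ps.map (fun p => p.1)).count p.1 == 1))).map (fun p => p.1)
  · obtain ⟨p, hp, rfl⟩ := List.mem_map.mp hm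
    have hpred := (List.mem_filter.mp hp).2
    have h1 : (ps.map (fun p => p.1)).count p.1 = 1 := by simpa using hpred
    have hsub : List.Sublist
        ((ps.filter (fun p => ((ps.map (fun p => p.1)).count p.1 == 1))).map (fun p => p.1))
        (ps.map (fun p => p.1)) := List.Sublist.map _ List.filter_sublist
    have := hsub.count_le p.1
    omega
  · rw [List.count_eq_zero.mpr hm]
    omega

-- ===== VERDICT (by name: the statement is the Claim_ definition above) =====
theorem build_name_lookup_spec : Claim_equal_build_name_lookup := by
  intro names _ _
  unfold Spec_build_name_lookup build_name_lookup build_name_lookup_alt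
  rw [pvA_flatten, pvB_pairs]
  rw [pvMain (names.flatMap pvPairOf) PySem.Dict.empty [] PySem.Set.empty (by intro k; simp)]
  dsimp only
  generalize names.flatMap pvPairOf = ps
  simp only [Prod.mk.injEq]
  refine ⟨?_, (pvB_dup0 (ps.map (fun p => p.1))).symm⟩
  -- first components
  rw [pvErase_fold, pvItems_foldl_pvIns ps PySem.Dict.empty [] (by intro k; simp)]
  have hitems0 : (PySem.Dict.empty : PySem.Dict String String).items = [] := rfl
  rw [hitems0, List.nil_append]
  -- A side: the survivors of the pop pass are exactly the count-1 first occurrences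
  have h1 : ∀ p ∈ pvDbk [] ps,
      (!(List.contains (List.foldl PySem.Set.add PySem.Set.empty (pvRep [] (ps.map (fun p => p.1)))) p.1))
      = ((ps.map (fun p => p.1)).count p.1 == 1) := by
    intro p hp
    rw [pvSet_foldl_contains]
    have hmem : p.1 ∈ ps.map (fun p => p.1) := List.mem_map.mpr ⟨p, pvDbk_sub ps [] p hp, rfl⟩
    exact pvRep_not_contains _ p.1 (List.count_pos_iff.mpr hmem)
  rw [List.filter_congr h1, pvDbk_filter _ ps [] (fun k => le_refl _)]
  rw [List.filter_congr (fun (p : String × String) (_ : p ∈ ps) => by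
    simp : ∀ p ∈ ps, ((ps.map (fun p => p.1)).count p.1 == 1 && !(([] : List String).contains p.1))
      = ((ps.map (fun p => p.1)).count p.1 == 1))]
  -- B side: the counter is the multiset count; count-1 pairs have fresh distinct keys
  have hcnt : ∀ p ∈ ps,
      ((((ps.map (fun p => p.1)).foldl
          (fun d k => d.insert k (d.getD k (0 : Int) + 1)) PySem.Dict.empty).getD p.1 (0 : Int)) == 1)
      = ((ps.map (fun p => p.1)).count p.1 == 1) := by
    intro p _
    rw [PySem.Dict.foldl_insert_getD_add_one_eq_counter, PySem.Dict.getD_counter]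
    exact pvCastBeq _
  rw [List.filter_congr hcnt]
  rw [PySem.Dict.items_foldl_insert_fresh
      (ps.filter (fun p => (ps.map (fun p => p.1)).count p.1 == 1))
      (fun p => p.1) (fun p => p.2) PySem.Dict.empty (fun a _ => by simp) (pvNodup ps)]
  rw [hitems0, List.nil_append]
  simp
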